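-- pv_equiv track=rewrite | github.com/Skybeast99/21game | pipyao.py | determine_section
-- ===== SOURCE A (Python) =====
-- def determine_section(x1, x2, y1, y2) -> str:
--     x = set()
--     y = set()
--
--     if x1 < x2:
--         for i in range(x1, x2 + 1, 1):
--             x.add(i)
--     elif x1 > x2:
--         for i in range(x1, x2 + 1, -1):
--             x.add(i)
--     else:
--         x.add(x1)
--
--
--     if y1 < y2:
--         for m in range(y1, y2 + 1, 1):
--             y.add(m)
--     elif y1 > y2:
--         for m in range(y1, y2 + 1, -1):
--             y.add(m)
--     else:
--         y.add(y2)
--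
--
--     if y.intersection(x):
--         return 'да'
--     else:
--         return 'нет'
-- ===== SOURCE B (Python) =====
-- def determine_section(x1, x2, y1, y2) -> str:
--     xlo, xhi = min(x1, x2), max(x1, x2)
--     ylo, yhi = min(y1, y2), max(y1, y2)
--     return 'да' if max(xlo, ylo) <= min(xhi, yhi) else 'нет'
-- ===== Notes on version B (the rewrite author's own statement) =====
-- stated objective: faster
-- what changed: B replaces A's element-by-element construction of two integer sets and their intersection test with an O(1) closed-form interval-overlap test (max of lower bounds vs min of upper bounds).
-- intended difference: When a pair is given in descending order (x1 > x2 or y1 > y2), A's range(x1, x2+1, -1) stops at x2+2 and so misses the two smallest values of that range; on inputs where the two ranges intersect only in those missed values A returns 'нет' although the ranges do intersect, while B returns the intended 'да'. — e.g. on determine_section(3, 1, 1, 2): A returns "нет", B returns "да"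
import Mathlib
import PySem

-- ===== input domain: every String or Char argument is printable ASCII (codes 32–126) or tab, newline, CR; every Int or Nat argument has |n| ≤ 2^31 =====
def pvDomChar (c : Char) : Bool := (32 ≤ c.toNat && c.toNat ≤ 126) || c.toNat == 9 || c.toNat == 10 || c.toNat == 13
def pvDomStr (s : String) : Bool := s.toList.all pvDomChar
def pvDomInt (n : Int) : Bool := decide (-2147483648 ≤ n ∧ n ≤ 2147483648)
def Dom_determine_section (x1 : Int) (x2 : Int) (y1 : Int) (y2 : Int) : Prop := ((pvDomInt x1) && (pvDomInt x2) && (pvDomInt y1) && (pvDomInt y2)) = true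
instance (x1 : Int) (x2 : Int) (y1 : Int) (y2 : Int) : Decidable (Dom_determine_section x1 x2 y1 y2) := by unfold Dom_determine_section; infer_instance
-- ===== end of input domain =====

-- B replaces A's element-by-element set construction and intersection by an O(1)
-- closed-form interval-overlap test; objective: faster. On descending pairs A's
-- range misses its two smallest values, so A and B differ exactly on D_ below.

-- ===== PORT A =====
-- Python's 'set' is ported as Std.HashSet Int (exact for membership, which is all
-- A's result depends on). 'if y.intersection(x):' is the truthiness of the
-- intersection, ported as the element-wise filter being non-empty (order-independent).
def determine_section (x1 : Int) (x2 : Int) (y1 : Int) (y2 : Int) : String :=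
  let x : Std.HashSet Int :=
    if x1 < x2 then
      (PySem.List.pyRange x1 (x2 + 1) 1).foldl (fun s i => s.insert i) ∅
    else if x1 > x2 then
      (PySem.List.pyRange x1 (x2 + 1) (-1)).foldl (fun s i => s.insert i) ∅
    else
      (∅ : Std.HashSet Int).insert x1
  let y : Std.HashSet Int :=
    if y1 < y2 then
      (PySem.List.pyRange y1 (y2 + 1) 1).foldl (fun s m => s.insert m) ∅
    else if y1 > y2 then
      (PySem.List.pyRange y1 (y2 + 1) (-1)).foldl (fun s m => s.insert m) ∅
    else
      (∅ : Std.HashSet Int).insert y2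
  if y.toList.filter (fun m => x.contains m) ≠ [] then "да" else "нет"

-- ===== PORT B =====
def determine_section_alt (x1 : Int) (x2 : Int) (y1 : Int) (y2 : Int) : String :=
  let xlo := min x1 x2
  let xhi := max x1 x2
  let ylo := min y1 y2
  let yhi := max y1 y2
  if max xlo ylo ≤ min xhi yhi then "да" else "нет"

-- ===== PRECONDITION & SPEC =====
-- On inputs with a descending pair (x1 > x2 or y1 > y2) whose ranges intersect only in
-- the two smallest values A's descending range skips, A returns 'нет' although the ranges
-- intersect; B returns the intended 'да'.
def D_determine_section (x1 : Int) (x2 : Int) (y1 : Int) (y2 : Int) : Prop :=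
  max (min x1 x2) (min y1 y2) ≤ min (max x1 x2) (max y1 y2) ∧
  ¬ (max (if x1 ≤ x2 then x1 else x2 + 2) (if y1 ≤ y2 then y1 else y2 + 2)
       ≤ min (max x1 x2) (max y1 y2))
instance (x1 : Int) (x2 : Int) (y1 : Int) (y2 : Int) : Decidable (D_determine_section x1 x2 y1 y2) := by unfold D_determine_section; infer_instance

def Spec_determine_section (x1 : Int) (x2 : Int) (y1 : Int) (y2 : Int) (out : String) : Prop := ¬ D_determine_section x1 x2 y1 y2 → out = determine_section_alt x1 x2 y1 y2
instance (x1 : Int) (x2 : Int) (y1 : Int) (y2 : Int) (out : String) : Decidable (Spec_determine_section x1 x2 y1 y2 out) := by unfold Spec_determine_section; infer_instance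

def pvDiffWitness_determine_section : Int × Int × Int × Int := (3, 1, 1, 2)
def pvDiffWitnessOut_determine_section : String × String := ("нет", "да")

-- ===== CLAIM (what is proved, stated in full; the proofs are below) =====
def Claim_unchanged_determine_section : Prop := ∀ (x1 : Int) (x2 : Int) (y1 : Int) (y2 : Int), Dom_determine_section x1 x2 y1 y2 → Spec_determine_section x1 x2 y1 y2 (determine_section x1 x2 y1 y2)
def Claim_changed_determine_section : Prop := Dom_determine_section (pvDiffWitness_determine_section.1) (pvDiffWitness_determine_section.2.1) (pvDiffWitness_determine_section.2.2.1) (pvDiffWitness_determine_section.2.2.2) ∧ D_determine_section (pvDiffWitness_determine_section.1) (pvDiffWitness_determine_section.2.1) (pvDiffWitness_determine_section.2.2.1) (pvDiffWitness_determine_section.2.2.2) ∧ determine_section (pvDiffWitness_determine_section.1) (pvDiffWitness_determine_section.2.1) (pvDiffWitness_determine_section.2.2.1) (pvDiffWitness_determine_section.2.2.2) = pvDiffWitnessOut_determine_section.1 ∧ determine_section_alt (pvDiffWitness_determine_section.1) (pvDiffWitness_determine_section.2.1) (pvDiffWitness_determine_section.2.2.1) (pvDiffWitness_determine_section.2.2.2)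 = pvDiffWitnessOut_determine_section.2 ∧ pvDiffWitnessOut_determine_section.1 ≠ pvDiffWitnessOut_determine_section.2
def Claim_exact_determine_section : Prop := ∀ (x1 : Int) (x2 : Int) (y1 : Int) (y2 : Int), Dom_determine_section x1 x2 y1 y2 → D_determine_section x1 x2 y1 y2 → determine_section x1 x2 y1 y2 ≠ determine_section_alt x1 x2 y1 y2

-- ===== LEMMAS AND PROOFS =====

-- the lower bound of the interval A's set actually covers for a coordinate pair
def pvLo (a b : Int) : Int := if a ≤ b then a else b + 2

theorem pv_mem_foldl_insert (l : List Int) (s : Std.HashSet Int) (z : Int) :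
    z ∈ l.foldl (fun t i => t.insert i) s ↔ z ∈ s ∨ z ∈ l := by
  induction l generalizing s with
  | nil => simp
  | cons a l ih =>
    simp [List.foldl_cons, ih, Std.HashSet.mem_insert]
    tauto

-- the set A builds for x contains exactly the integers of [pvLo x1 x2, max x1 x2]
theorem pv_mem_x (a b z : Int) :
    (z ∈ (if a < b then
            (PySem.List.pyRange a (b + 1) 1).foldl (fun t i => t.insert i) (∅ : Std.HashSet Int)
          else if a > b then
            (PySem.List.pyRange a (b + 1) (-1)).foldl (fun t i => t.insert i) (∅ : Std.HashSet Int)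
          else (∅ : Std.HashSet Int).insert a)) ↔ pvLo a b ≤ z ∧ z ≤ max a b := by
  split_ifs with h1 h2 <;>
    simp only [pv_mem_foldl_insert, PySem.List.mem_pyRange_one, PySem.List.mem_pyRange_neg_one,
      Std.HashSet.mem_insert, beq_iff_eq, Std.HashSet.not_mem_empty, false_or, or_false, pvLo] <;>
    omega

-- same for y (A's else-branch inserts y2 there, but then y1 = y2)
theorem pv_mem_y (a b z : Int) :
    (z ∈ (if a < b then
            (PySem.List.pyRange a (b + 1) 1).foldl (fun t m => t.insert m) (∅ : Std.HashSet Int)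
          else if a > b then
            (PySem.List.pyRange a (b + 1) (-1)).foldl (fun t m => t.insert m) (∅ : Std.HashSet Int)
          else (∅ : Std.HashSet Int).insert b)) ↔ pvLo a b ≤ z ∧ z ≤ max a b := by
  split_ifs with h1 h2 <;>
    simp only [pv_mem_foldl_insert, PySem.List.mem_pyRange_one, PySem.List.mem_pyRange_neg_one,
      Std.HashSet.mem_insert, beq_iff_eq, Std.HashSet.not_mem_empty, false_or, or_false, pvLo] <;>
    omega

theorem pv_filter_ne_nil (y x : Std.HashSet Int) :
    y.toList.filter (fun m => x.contains m) ≠ [] ↔ ∃ z, z ∈ y ∧ z ∈ x := by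
  rw [Ne, List.filter_eq_nil_iff]
  push Not
  constructor
  · rintro ⟨z, hz, hc⟩
    exact ⟨z, Std.HashSet.mem_toList.1 hz, Std.HashSet.contains_iff_mem.1 (by simpa using hc)⟩
  · rintro ⟨z, hy, hx⟩
    exact ⟨z, Std.HashSet.mem_toList.2 hy, by simpa using Std.HashSet.contains_iff_mem.2 hx⟩

-- A returns 'да' exactly when its two (possibly clipped) intervals overlap
theorem pv_A_eq (x1 x2 y1 y2 : Int) :
    determine_section x1 x2 y1 y2 =
      (if max (pvLo x1 x2) (pvLo y1 y2) ≤ min (max x1 x2) (max y1 y2) then "да" else "нет") := by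
  unfold determine_section
  by_cases hov : max (pvLo x1 x2) (pvLo y1 y2) ≤ min (max x1 x2) (max y1 y2)
  · rw [if_pos hov, if_pos]
    rw [pv_filter_ne_nil]
    refine ⟨max (pvLo x1 x2) (pvLo y1 y2), ?_, ?_⟩
    · rw [pv_mem_y y1 y2]; omega
    · rw [pv_mem_x x1 x2]; omega
  · rw [if_neg hov, if_neg]
    rw [pv_filter_ne_nil]
    rintro ⟨z, hy, hx⟩
    rw [pv_mem_y y1 y2] at hy
    rw [pv_mem_x x1 x2] at hx
    omega

-- ===== VERDICT (by name: the statements are the Claim_ definitions above) =====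
theorem determine_section_spec : Claim_unchanged_determine_section := by
  intro x1 x2 y1 y2 _ hnd
  show determine_section x1 x2 y1 y2 = determine_section_alt x1 x2 y1 y2
  rw [pv_A_eq]
  unfold determine_section_alt D_determine_section at *
  simp only [pvLo] at *
  split_ifs with h1 h2 <;> first | rfl | (exfalso; omega)

theorem determine_section_changed : Claim_changed_determine_section := by
  unfold Claim_changed_determine_section
  refine ⟨by decide, by decide, ?_, by decide, by decide⟩
  show determine_section 3 1 1 2 = "нет"
  rw [pv_A_eq]; decide

theorem determine_section_tight : Claim_exact_determine_section := by
  intro x1 x2 y1 y2 _ hd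
  rw [pv_A_eq]
  unfold determine_section_alt D_determine_section at *
  simp only [pvLo] at *
  rw [if_neg (by omega), if_pos (by omega)]
  decide
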